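-- pv_equiv track=rewrite | github.com/knyazevRm/yandex_task | trains_3/homework/1/B/B.py | get_counter_dictionary
-- ===== SOURCE A (Python) =====
-- def get_counter_dictionary(init_line):
--     counter_dict = {}
--     for char in init_line:
--         if char in counter_dict.keys():
--             counter_dict[char] += 1
--         else:
--             counter_dict[char] = 1
--
--     return dict(sorted(counter_dict.items(), key=lambda item:item[1], reverse=True))
-- ===== SOURCE B (Python) =====
-- def get_counter_dictionary(init_line):
--     counts = {}
--     for ch in init_line:
--         counts[ch] = counts.get(ch, 0) + 1
--     if not counts:
--         return {}
--     mx = max(counts.values())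
--     buckets = [[] for _ in range(mx + 1)]
--     for ch, f in counts.items():
--         buckets[f].append(ch)
--     result = {}
--     for f in range(mx, 0, -1):
--         for ch in buckets[f]:
--             result[ch] = f
--     return result
-- ===== Notes on version B (the rewrite author's own statement) =====
-- stated objective: alternative
-- what changed: Replaces A's comparison sort of the (char, count) items by a counting/bucket sort: buckets indexed by frequency are filled in first-seen order and emitted from the maximum frequency down, preserving A's exact stable tie order.
import Mathlib
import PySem

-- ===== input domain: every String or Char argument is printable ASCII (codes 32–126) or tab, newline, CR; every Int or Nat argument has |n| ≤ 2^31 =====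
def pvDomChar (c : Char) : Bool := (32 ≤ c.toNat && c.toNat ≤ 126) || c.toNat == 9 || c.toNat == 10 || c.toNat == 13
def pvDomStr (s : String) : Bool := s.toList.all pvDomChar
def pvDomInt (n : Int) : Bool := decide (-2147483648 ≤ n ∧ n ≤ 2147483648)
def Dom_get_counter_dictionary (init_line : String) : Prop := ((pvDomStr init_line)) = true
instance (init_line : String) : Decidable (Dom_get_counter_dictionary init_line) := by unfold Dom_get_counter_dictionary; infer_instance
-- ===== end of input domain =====

-- B replaces A's comparison sort of the (char, count) items by a counting/bucket sort:
-- buckets indexed by frequency, emitted from the maximum frequency down (same stable tie order).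

-- ===== PORT A =====
def get_counter_dictionary (init_line : String) : List (String × Int) :=
  let counter_dict : PySem.Dict String Int :=
    init_line.toList.foldl (fun d char =>
      let c := String.ofList [char]
      if d.contains c then d.insert c (d.getD c 0 + 1) else d.insert c 1)
      PySem.Dict.empty
  (PySem.Dict.ofList (PySem.List.sorted counter_dict.items (fun item => item.2) true)).items

-- ===== PORT B =====
def get_counter_dictionary_alt (init_line : String) : List (String × Int) :=
  let counts : PySem.Dict String Int :=
    init_line.toList.foldl (fun d ch =>
      let c := String.ofList [ch]
      d.insert c (d.getD c 0 + 1))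
      PySem.Dict.empty
  if counts.items = [] then []
  else
    let mx : Int := PySem.List.maxD counts.values (fun v => v) 0
    let buckets0 : List (List String) := (PySem.List.pyRange 0 (mx + 1) 1).map (fun _ => [])
    let buckets := counts.items.foldl
      (fun bs p => PySem.List.pySetD bs p.2 (PySem.List.pyGetD bs p.2 [] ++ [p.1])) buckets0
    let result := (PySem.List.pyRange mx 0 (-1)).foldl
      (fun d f => (PySem.List.pyGetD buckets f []).foldl (fun d ch => d.insert ch f) d)
      PySem.Dict.empty
    result.items

-- ===== PRECONDITION & SPEC =====
def Spec_get_counter_dictionary (init_line : String) (out : List (String × Int)) : Prop := out = get_counter_dictionary_alt init_line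
instance (init_line : String) (out : List (String × Int)) : Decidable (Spec_get_counter_dictionary init_line out) := by unfold Spec_get_counter_dictionary; infer_instance

-- ===== CLAIM (what is proved, stated in full; the proofs are below) =====
def Claim_equal_get_counter_dictionary : Prop := ∀ (init_line : String), Dom_get_counter_dictionary init_line → Spec_get_counter_dictionary init_line (get_counter_dictionary init_line)

-- ===== LEMMAS AND PROOFS =====

lemma insertBy_append_of_not_before {α : Type} (before : α → α → Bool) (x : α) :
    ∀ (l1 l2 : List α), (∀ y ∈ l1, before x y = false) →
      PySem.List.insertBy before x (l1 ++ l2) = l1 ++ PySem.List.insertBy before x l2 := by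
  intro l1
  induction l1 with
  | nil => intro l2 _; simp
  | cons y ys ih =>
      intro l2 h
      have hy : before x y = false := h y (by simp)
      simp only [List.cons_append, PySem.List.insertBy, hy]
      simp [ih _ (fun z hz => h z (by simp [hz]))]

lemma insertBy_of_forall_before {α : Type} (before : α → α → Bool) (x : α) (l : List α)
    (h : ∀ y ∈ l, before x y = true) :
    PySem.List.insertBy before x l = x :: l := by
  cases l with
  | nil => rfl
  | cons y ys => simp [PySem.List.insertBy, h y (by simp)]

lemma pyRange_neg_one_append (a m b : Int) (h1 : b ≤ m) (h2 : m ≤ a) :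
    PySem.List.pyRange a b (-1) = PySem.List.pyRange a m (-1) ++ PySem.List.pyRange m b (-1) := by
  rw [PySem.List.pyRange_neg_one_eq_reverse a b,
    PySem.List.pyRange_one_append (b+1) (m+1) (a+1) (by omega) (by omega),
    List.reverse_append, ← PySem.List.pyRange_neg_one_eq_reverse,
    ← PySem.List.pyRange_neg_one_eq_reverse]

lemma map_fst_repair (l : List (String × Int)) (f : Int) :
    ((l.filter (fun p => p.2 == f)).map (·.1)).map (fun ch => (ch, f))
      = l.filter (fun p => p.2 == f) := by
  rw [List.map_map]
  have : ∀ p ∈ l.filter (fun p => p.2 == f), ((fun ch => (ch, f)) ∘ (·.1)) p = id p := by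
    intro p hp
    have := List.of_mem_filter hp
    simp at this
    simp [Function.comp, ← this]
  rw [List.map_congr_left this, List.map_id]

lemma sorted_rev_eq_flatMap (a b : Int) :
    ∀ (xs : List (String × Int)), (∀ p ∈ xs, b < p.2 ∧ p.2 ≤ a) →
      PySem.List.sorted xs (fun p => p.2) true
        = (PySem.List.pyRange a b (-1)).flatMap (fun f => xs.filter (fun p => p.2 == f)) := by
  intro xs
  induction xs using List.reverseRecOn with
  | nil => intro _; simp [PySem.List.sorted]
  | append_singleton xs x ih =>
      intro h
      have hx := h x (by simp)
      have hxs : ∀ p ∈ xs, b < p.2 ∧ p.2 ≤ a := fun p hp => h p (by simp [hp])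
      set before : (String × Int) → (String × Int) → Bool :=
        fun p q => decide (q.2 < p.2) with hbef
      have hL : PySem.List.sorted (xs ++ [x]) (fun p => p.2) true
          = PySem.List.insertBy before x (PySem.List.sorted xs (fun p => p.2) true) := by
        rw [PySem.List.sorted_rev_eq_foldl_insertBy, List.foldl_append,
          ← PySem.List.sorted_rev_eq_foldl_insertBy]
        simp [hbef]
      rw [hL, ih hxs]
      -- split the range at x.2
      rw [pyRange_neg_one_append a x.2 b (by omega) (by omega),
        PySem.List.pyRange_neg_one_cons (a := x.2) (b := b) (by omega)]
      simp only [List.flatMap_append, List.flatMap_cons]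
      set Hi := (PySem.List.pyRange a x.2 (-1)).flatMap (fun f => xs.filter (fun p => p.2 == f)) with hHi
      set Bv := xs.filter (fun p => p.2 == x.2) with hBv
      set Lo := (PySem.List.pyRange (x.2 - 1) b (-1)).flatMap (fun f => xs.filter (fun p => p.2 == f)) with hLo
      have hHiF : ∀ y ∈ Hi ++ Bv, before x y = false := by
        intro y hy
        rcases List.mem_append.1 hy with hy | hy
        · rcases List.mem_flatMap.1 hy with ⟨f, hf, hyf⟩
          have hfr := PySem.List.mem_pyRange_neg_one.1 hf
          have := List.of_mem_filter hyf
          simp only [beq_iff_eq] at this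
          simp [hbef]; omega
        · have := List.of_mem_filter hy
          simp only [beq_iff_eq] at this
          simp [hbef]; omega
      have hLoT : ∀ y ∈ Lo, before x y = true := by
        intro y hy
        rcases List.mem_flatMap.1 hy with ⟨f, hf, hyf⟩
        have hfr := PySem.List.mem_pyRange_neg_one.1 hf
        have := List.of_mem_filter hyf
        simp only [beq_iff_eq] at this
        simp [hbef]; omega
      have hIns : PySem.List.insertBy before x (Hi ++ (Bv ++ Lo)) = Hi ++ Bv ++ (x :: Lo) := by
        rw [← List.append_assoc, insertBy_append_of_not_before before x (Hi ++ Bv) Lo hHiF,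
          insertBy_of_forall_before before x Lo hLoT]
      rw [hIns]
      -- now rewrite the three flatMaps over the extended list
      have hiCon : (PySem.List.pyRange a x.2 (-1)).flatMap (fun f => (xs ++ [x]).filter (fun p => p.2 == f)) = Hi := by
        rw [hHi]
        apply List.flatMap_congr
        intro f hf
        have hfr := PySem.List.mem_pyRange_neg_one.1 hf
        have : (x.2 == f) = false := by simp; omega
        simp [List.filter_append, this]
      have vCon : (xs ++ [x]).filter (fun p => p.2 == x.2) = Bv ++ [x] := by
        simp [hBv, List.filter_append]
      have loCon : (PySem.List.pyRange (x.2 - 1) b (-1)).flatMap (fun f => (xs ++ [x]).filter (fun p => p.2 == f)) = Lo := by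
        rw [hLo]
        apply List.flatMap_congr
        intro f hf
        have hfr := PySem.List.mem_pyRange_neg_one.1 hf
        have : (x.2 == f) = false := by simp; omega
        simp [List.filter_append, this]
      rw [hiCon, vCon, loCon]
      simp

lemma pySetD_map_pyRange (g : Int → List String) (n v : Int) (w : List String)
    (h0 : 0 ≤ v) (_h1 : v < n) :
    PySem.List.pySetD ((PySem.List.pyRange 0 n 1).map g) v w
      = (PySem.List.pyRange 0 n 1).map (fun f => if f = v then w else g f) := by
  rw [PySem.List.pySetD_of_nonneg _ _ h0]
  apply List.ext_getElem
  · simp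
  · intro k hk hk'
    simp only [List.getElem_set, List.getElem_map]
    rw [PySem.List.getElem_pyRange_one]
    have hkn : (k : Int) < n := by
      have := hk; simp [PySem.List.length_pyRange_one] at this; omega
    split_ifs with hh1 hh2 hh2 <;> first | rfl | omega

lemma fill_buckets (n : Int) :
    ∀ (ps : List (String × Int)) (g : Int → List String), (∀ p ∈ ps, 0 ≤ p.2 ∧ p.2 < n) →
      ps.foldl (fun bs p => PySem.List.pySetD bs p.2 (PySem.List.pyGetD bs p.2 [] ++ [p.1]))
          ((PySem.List.pyRange 0 n 1).map g)
        = (PySem.List.pyRange 0 n 1).map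
            (fun f => g f ++ (ps.filter (fun p => p.2 == f)).map (·.1)) := by
  intro ps
  induction ps with
  | nil => intro g _; simp
  | cons p ps ih =>
      intro g h
      have hp := h p (by simp)
      have hs : ∀ q ∈ ps, 0 ≤ q.2 ∧ q.2 < n := fun q hq => h q (by simp [hq])
      simp only [List.foldl_cons]
      rw [PySem.List.pyGetD_map_pyRange_of_nonneg g n p.2 [] hp.1 hp.2,
        pySetD_map_pyRange g n p.2 (g p.2 ++ [p.1]) hp.1 hp.2, ih _ hs]
      apply List.map_congr_left
      intro f hf
      by_cases hfv : f = p.2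
      · subst hfv
        simp
      · have : (p.2 == f) = false := by simp; omega
        simp [this, hfv]

lemma items_ofList_of_nodup (ys : List (String × Int)) (h : (ys.map (·.1)).Nodup) :
    (PySem.Dict.ofList ys).items = ys := by
  have := PySem.Dict.items_foldl_insert_fresh ys (fun p => p.1) (fun p => p.2)
      (PySem.Dict.empty : PySem.Dict String Int)
      (by intro a _; simp [PySem.Dict.contains_empty]) h
  simpa [PySem.Dict.ofList, PySem.Dict.update] using this

lemma out_fold (items : List (String × Int)) :
    ∀ (fs : List Int) (d : PySem.Dict String Int),
      ((d.items ++ fs.flatMap (fun f => items.filter (fun p => p.2 == f))).map (·.1)).Nodup →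
      (fs.foldl (fun d f =>
          ((items.filter (fun p => p.2 == f)).map (·.1)).foldl (fun d ch => d.insert ch f) d)
        d).items
        = d.items ++ fs.flatMap (fun f => items.filter (fun p => p.2 == f)) := by
  intro fs
  induction fs with
  | nil => intro d _; simp
  | cons f fs ih =>
      intro d hnd
      simp only [List.flatMap_cons, List.map_append, ← List.append_assoc] at hnd
      set A := d.items.map (fun p => p.1) with hA
      set B := (items.filter (fun p => p.2 == f)).map (fun p => p.1) with hB
      have hAB : (A ++ B).Nodup := hnd.sublist (List.sublist_append_left _ _)
      have hfresh : ∀ a ∈ (items.filter (fun p => p.2 == f)).map (·.1),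
          d.contains a = false := by
        intro a ha
        by_contra hc
        have hc' : d.contains a = true := by
          cases hcv : d.contains a
          · exact absurd hcv hc
          · rfl
        have hker : a ∈ d.keys := (PySem.Dict.contains_iff_mem_keys d a).1 hc'
        have haA : a ∈ A := by simpa [hA, PySem.Dict.keys] using hker
        have haB : a ∈ B := by simpa [hB] using ha
        exact (List.nodup_append.1 hAB).2.2 a haA a haB rfl
      have hBnd : B.Nodup := (List.nodup_append.1 hAB).2.1
      have hins := PySem.Dict.items_foldl_insert_fresh
        ((items.filter (fun p => p.2 == f)).map (·.1)) (fun ch => ch) (fun _ => f) d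
        hfresh (by simpa using hBnd)
      simp only [List.foldl_cons]
      have hmap : ((items.filter (fun p => p.2 == f)).map (·.1)).map (fun a => (a, f))
          = items.filter (fun p => p.2 == f) := map_fst_repair items f
      rw [ih]
      · rw [hins, hmap]
        simp [List.append_assoc]
      · rw [hins, hmap]
        simpa [List.append_assoc] using hnd

lemma counts_eq_counter (cs : List Char) :
    cs.foldl (fun d ch =>
        let c := String.ofList [ch]
        d.insert c (d.getD c 0 + 1)) PySem.Dict.empty
      = PySem.Dict.counter (cs.map (fun c => String.ofList [c])) := by
  rw [← PySem.Dict.foldl_insert_getD_add_one_eq_counter, List.foldl_map]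

lemma countA_eq_counter (cs : List Char) :
    cs.foldl (fun d char =>
        let c := String.ofList [char]
        if d.contains c then d.insert c (d.getD c 0 + 1) else d.insert c 1) PySem.Dict.empty
      = PySem.Dict.counter (cs.map (fun c => String.ofList [c])) := by
  rw [← counts_eq_counter]
  apply PySem.List.foldl_congr_mem
  intro d c _
  simp only []
  by_cases h : d.contains (String.ofList [c])
  · simp [h]
  · have h' : d.contains (String.ofList [c]) = false := by
      cases hv : d.contains (String.ofList [c])
      · rfl
      · exact absurd hv h
    rw [if_neg (by simp [h']), PySem.Dict.getD_of_not_contains d 0 h']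
    norm_num


-- ===== VERDICT (by name: the statement is the Claim_ definition above) =====
theorem get_counter_dictionary_spec : Claim_equal_get_counter_dictionary := by
  intro s _
  unfold Spec_get_counter_dictionary get_counter_dictionary get_counter_dictionary_alt
  simp only [countA_eq_counter, counts_eq_counter]
  set chars := s.toList.map (fun c => String.ofList [c]) with hchars
  set cd := PySem.Dict.counter chars with hcd
  by_cases hnil : cd.items = []
  · rw [if_pos hnil, hnil]
    have h0 : PySem.List.sorted ([] : List (String × Int)) (fun item => item.2) true = [] := rfl
    rw [h0]
    exact items_ofList_of_nodup [] (by simp)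
  · rw [if_neg hnil]
    set mx := PySem.List.maxD cd.values (fun v => v) 0 with hmx
    have hvne : cd.values ≠ [] := by
      intro h
      exact hnil (List.map_eq_nil_iff.1 h)
    obtain ⟨m, hm⟩ : ∃ m, PySem.List.max? cd.values (fun v => v) = some m := by
      cases h : PySem.List.max? cd.values (fun v => v) with
      | none => exact absurd ((PySem.List.max?_eq_none_iff _ _).1 h) hvne
      | some m => exact ⟨m, rfl⟩
    have hmxm : mx = m := by rw [hmx, PySem.List.maxD, hm]; rfl
    have hub : ∀ p ∈ cd.items, p.2 ≤ mx := by
      intro p hp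
      have hmem : p.2 ∈ cd.values := List.mem_map.2 ⟨p, hp, rfl⟩
      have := PySem.List.max?_isMax hm p.2 hmem
      omega
    have hlb : ∀ p ∈ cd.items, 0 < p.2 := by
      intro p hp
      rw [hcd, PySem.Dict.items_counter] at hp
      rcases List.mem_map.1 hp with ⟨k, hk, rfl⟩
      have hkc : k ∈ chars := (PySem.Set.mem_ofList _ _).1 hk
      have := List.count_pos_iff.2 hkc
      simp only []
      exact_mod_cast this
    have hfill := fill_buckets (mx + 1) cd.items (fun _ => [])
      (fun p hp => ⟨by have := hlb p hp; omega, by have := hub p hp; omega⟩)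
    rw [hfill]
    simp only [List.nil_append]
    have hsorted := sorted_rev_eq_flatMap mx 0 cd.items
      (fun p hp => ⟨hlb p hp, hub p hp⟩)
    have hkeysnd : (cd.items.map (fun p => p.1)).Nodup := by
      have := PySem.Dict.nodup_keys_counter chars
      simpa [PySem.Dict.keys, hcd] using this
    have hnodupF : (((PySem.List.pyRange mx 0 (-1)).flatMap
        (fun f => cd.items.filter (fun p => p.2 == f))).map (fun p => p.1)).Nodup := by
      rw [← hsorted]
      exact (((PySem.List.sorted_perm cd.items (fun p => p.2) true).map (fun p => p.1)).symm).nodup hkeysnd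
    have hcong : List.foldl
        (fun d f =>
          List.foldl (fun d ch => d.insert ch f) d
            (PySem.List.pyGetD
              ((PySem.List.pyRange 0 (mx + 1) 1).map
                (fun f => (cd.items.filter (fun p => p.2 == f)).map (·.1))) f []))
        PySem.Dict.empty (PySem.List.pyRange mx 0 (-1))
      = List.foldl
        (fun d f =>
          ((cd.items.filter (fun p => p.2 == f)).map (·.1)).foldl (fun d ch => d.insert ch f) d)
        PySem.Dict.empty (PySem.List.pyRange mx 0 (-1)) := by
      apply PySem.List.foldl_congr_mem
      intro acc f hf
      have hfr := PySem.List.mem_pyRange_neg_one.1 hf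
      rw [PySem.List.pyGetD_map_pyRange_of_nonneg _ (mx + 1) f [] (by omega) (by omega)]
    rw [hcong]
    have hempty : (PySem.Dict.empty : PySem.Dict String Int).items = [] := rfl
    have hout := out_fold cd.items (PySem.List.pyRange mx 0 (-1)) PySem.Dict.empty
      (by rw [hempty]; simpa using hnodupF)
    rw [hout, hempty, List.nil_append, ← hsorted]
    exact items_ofList_of_nodup _ (by rw [hsorted]; exact hnodupF)
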